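-- pv_equiv track=rewrite | github.com/subtlemedicalinc/SubtleBoost | train/prototypes/mmt/MMTUNetHybrid/test_new.py | input2str
-- ===== SOURCE A (Python) =====
-- def input2str(x, n):
--     f = ''
--     for i in range(n):
--         if i in x:
--             f += f'{1}'
--         else:
--             f += f'{0}'
--     return f
-- ===== SOURCE B (Python) =====
-- def input2str(x, n):
--     f = ['0'] * n
--     for e in x:
--         if 0 <= e < n:
--             f[e] = '1'
--     return ''.join(f)
-- ===== Notes on version B (the rewrite author's own statement) =====
-- stated objective: faster
-- what changed: B scatters marks from x into a pre-sized '0' buffer and joins it, instead of A's per-index linear membership scan of x for every i in range(n).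
import Mathlib
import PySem

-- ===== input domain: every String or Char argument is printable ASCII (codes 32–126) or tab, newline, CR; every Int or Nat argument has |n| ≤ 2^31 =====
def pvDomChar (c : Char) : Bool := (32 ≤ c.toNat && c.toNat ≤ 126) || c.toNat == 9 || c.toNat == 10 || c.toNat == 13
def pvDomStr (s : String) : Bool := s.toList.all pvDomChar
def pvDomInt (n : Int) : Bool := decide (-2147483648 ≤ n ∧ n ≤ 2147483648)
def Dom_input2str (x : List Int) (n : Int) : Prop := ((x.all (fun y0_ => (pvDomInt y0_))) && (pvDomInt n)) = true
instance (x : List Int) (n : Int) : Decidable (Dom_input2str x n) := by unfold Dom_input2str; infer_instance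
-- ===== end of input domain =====

-- B scatters marks from x into a pre-sized '0' buffer instead of A's per-index membership scan (asymptotically faster).


-- ===== PORT A =====
-- f = ''; for i in range(n): f += '1' if i in x else '0'; return f
-- (string accumulation done on the List Char side, String.ofList at the end, as PySem prescribes)
def input2str (x : List Int) (n : Int) : String :=
  String.ofList ((PySem.List.pyRange 0 n 1).foldl
    (fun f i => if i ∈ x then f ++ ['1'] else f ++ ['0']) [])

-- ===== PORT B =====
-- f = ['0'] * n; for e in x: if 0 <= e < n: f[e] = '1'; return ''.join(f)
def input2str_alt (x : List Int) (n : Int) : String :=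
  String.ofList (x.foldl
    (fun f e => if 0 ≤ e ∧ e < n then f.set e.toNat '1' else f)
    (List.replicate n.toNat '0'))

-- ===== PRECONDITION & SPEC =====
def Spec_input2str (x : List Int) (n : Int) (out : String) : Prop := out = input2str_alt x n
instance (x : List Int) (n : Int) (out : String) : Decidable (Spec_input2str x n out) := by unfold Spec_input2str; infer_instance

-- ===== CLAIM (what is proved, stated in full; the proofs are below) =====
def Claim_equal_input2str : Prop := ∀ (x : List Int) (n : Int), Dom_input2str x n → Spec_input2str x n (input2str x n)

-- ===== LEMMAS AND PROOFS =====

-- B's scatter loop preserves the buffer length.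
theorem scatter_length (x : List Int) (n : Int) (f : List Char) :
    (x.foldl (fun f e => if 0 ≤ e ∧ e < n then f.set e.toNat '1' else f) f).length = f.length := by
  induction x generalizing f with
  | nil => rfl
  | cons e x ih =>
      simp only [List.foldl_cons]
      rw [ih]
      split_ifs <;> simp

-- Pointwise value of B's scattered buffer: '1' exactly at the indices present in x.
theorem scatter_getElem (x : List Int) (n : Int) (f : List Char)
    (hf : f.length = n.toNat) (k : Nat) (hk : k < f.length) :
    (x.foldl (fun f e => if 0 ≤ e ∧ e < n then f.set e.toNat '1' else f) f)[k]'(by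
      rw [scatter_length]; exact hk) =
    if (k : Int) ∈ x then '1' else f[k] := by
  induction x generalizing f with
  | nil => simp
  | cons e x ih =>
      simp only [List.foldl_cons]
      have hf' : (if 0 ≤ e ∧ e < n then f.set e.toNat '1' else f).length = n.toNat := by
        split_ifs <;> simp [hf]
      have hk' : k < (if 0 ≤ e ∧ e < n then f.set e.toNat '1' else f).length := by
        split_ifs <;> simpa [hf] using hk
      rw [ih _ hf' hk']
      by_cases hx : (k : Int) ∈ x
      · simp [hx]
      · simp only [List.mem_cons, hx, or_false]
        by_cases hke : (k : Int) = e
        · have hv : 0 ≤ e ∧ e < n := by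
            constructor
            · omega
            · have : (k : Int) < (n.toNat : Int) := by exact_mod_cast hf ▸ hk
              omega
          have het : e.toNat = k := by omega
          simp [hv, hke, het, List.getElem_set_self]
        · simp only [hke, if_false]
          split_ifs with hv
          · have : e.toNat ≠ k := by omega
            rw [List.getElem_set_ne (by omega)]
          · rfl

-- ===== VERDICT (by name: the statement is the Claim_ definition above) =====
theorem input2str_spec : Claim_equal_input2str := by
  intro x n _
  unfold Spec_input2str input2str input2str_alt
  congr 1
  rw [PySem.List.pyRange_one, List.foldl_map]
  have hA : ∀ (l : List Nat) (init : List Char),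
      List.foldl (fun (f : List Char) (k : Nat) => if 0 + (k : Int) ∈ x then f ++ ['1'] else f ++ ['0']) init l
        = init ++ l.map (fun (k : Nat) => if 0 + (k : Int) ∈ x then '1' else '0') := by
    intro l
    induction l with
    | nil => simp
    | cons k l ih =>
        intro init
        simp only [List.foldl_cons, List.map_cons]
        rw [ih]
        split_ifs with h <;> simp
  rw [hA, List.nil_append]
  apply List.ext_getElem
  · rw [List.length_map, List.length_range, scatter_length, List.length_replicate]
    simp
  · intro k h1 h2
    rw [scatter_getElem x n _ (by simp) k (by rw [scatter_length] at h2; exact h2)]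
    simp only [List.getElem_map, List.getElem_range, List.getElem_replicate]
    simp
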